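-- pv_equiv track=rewrite | github.com/Poul0s/Advent-Of-Code-2024 | d14/main.py | find_group
-- ===== SOURCE A (Python) =====
-- def find_group(robots, group_size=50):
-- 	tested_pos = set()
-- 	robots_positions = set([tuple(robot[0]) for robot in robots])
-- 	stack = []
-- 	for robot in robots_positions:
-- 		if robot not in tested_pos:
-- 			stack.append(robot)
-- 			curr_group_size = 0
-- 			while len(stack) != 0:
-- 				curr_pos = stack.pop()
-- 				if curr_pos not in tested_pos:
-- 					curr_group_size += 1
-- 					if curr_group_size == group_size:
-- 						return True
-- 					tested_pos.add(curr_pos)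
-- 					if (curr_pos[0] - 1, curr_pos[1]) in robots_positions:
-- 						stack.append((curr_pos[0] - 1, curr_pos[1]))
-- 					if (curr_pos[0] + 1, curr_pos[1]) in robots_positions:
-- 						stack.append((curr_pos[0] + 1, curr_pos[1]))
-- 					if (curr_pos[0], curr_pos[1] - 1) in robots_positions:
-- 						stack.append((curr_pos[0], curr_pos[1] - 1))
-- 					if (curr_pos[0], curr_pos[1] + 1) in robots_positions:
-- 						stack.append((curr_pos[0], curr_pos[1] + 1))
-- 	return False
-- ===== SOURCE B (Python) =====
-- def find_group(robots, group_size=50):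
--     positions = {tuple(robot[0]) for robot in robots}
--     if group_size < 1:
--         return False
--     remaining = set(positions)
--     while remaining:
--         seed = next(iter(remaining))
--         comp = {seed}
--         frontier = {seed}
--         while frontier:
--             frontier = {q for p in frontier
--                         for q in ((p[0] - 1, p[1]), (p[0] + 1, p[1]),
--                                   (p[0], p[1] - 1), (p[0], p[1] + 1))
--                         if q in remaining and q not in comp}
--             comp |= frontier
--         if len(comp) >= group_size:
--             return True
--         remaining -= comp
--     return False
-- ===== Notes on version B (the rewrite author's own statement) =====
-- stated objective: alternative
-- what changed: Replaces the early-returning explicit-stack DFS with per-component frontier-set BFS over a shrinking 'remaining' set: each component is grown level-by-level with set comprehensions, its full size is compared with group_size (guarded by group_size >= 1, matching A's incremental '== group_size' hit condition), and finished components are subtracted from the remaining positions.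
-- outside the precondition, e.g. on find_group([[[5]]], 1): A returns True, B raises IndexError
import Mathlib
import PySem

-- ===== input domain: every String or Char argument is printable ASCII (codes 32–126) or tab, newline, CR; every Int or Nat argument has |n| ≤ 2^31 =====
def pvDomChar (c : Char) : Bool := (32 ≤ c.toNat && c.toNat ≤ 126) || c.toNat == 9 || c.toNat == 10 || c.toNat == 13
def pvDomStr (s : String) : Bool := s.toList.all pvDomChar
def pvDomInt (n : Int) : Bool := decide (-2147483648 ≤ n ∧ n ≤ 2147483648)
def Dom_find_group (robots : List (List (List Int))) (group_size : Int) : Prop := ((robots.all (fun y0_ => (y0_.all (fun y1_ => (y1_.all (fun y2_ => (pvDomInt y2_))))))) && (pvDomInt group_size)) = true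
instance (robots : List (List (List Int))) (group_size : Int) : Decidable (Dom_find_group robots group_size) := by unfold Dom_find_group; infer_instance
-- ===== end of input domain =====

-- B replaces A's early-returning explicit-stack DFS by per-component frontier-set BFS
-- over a shrinking remaining-set, comparing each full component size with group_size
-- (alternative decomposition, no speed claim). Equivalence is about the return value.

-- ===== PORT A =====
-- the four neighbour tuples (curr_pos[0]±1, curr_pos[1]), (curr_pos[0], curr_pos[1]±1)
def pvNbrs (p : List Int) : List (List Int) :=
  [[PySem.List.pyGetD p 0 0 - 1, PySem.List.pyGetD p 1 0],
   [PySem.List.pyGetD p 0 0 + 1, PySem.List.pyGetD p 1 0],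
   [PySem.List.pyGetD p 0 0, PySem.List.pyGetD p 1 0 - 1],
   [PySem.List.pyGetD p 0 0, PySem.List.pyGetD p 1 0 + 1]]

-- one 'if q in robots_positions: stack.append(q)'; the stack keeps its top at the head
def pvPush (positions : PySem.Set (List Int)) (q : List Int) (s : List (List Int)) : List (List Int) :=
  if PySem.Set.contains positions q then q :: s else s

theorem pvPush_mem {positions : PySem.Set (List Int)} {q : List Int} {s : List (List Int)}
    (hs : ∀ p ∈ s, p ∈ positions) : ∀ p ∈ pvPush positions q s, p ∈ positions := by
  intro p hp
  unfold pvPush at hp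
  split at hp
  case isTrue h =>
    rcases List.mem_cons.mp hp with h1 | h1
    · exact h1 ▸ (PySem.Set.contains_iff _ _).mp h
    · exact hs p h1
  case isFalse => exact hs p hp

theorem pvPush_length (positions : PySem.Set (List Int)) (q : List Int) (s : List (List Int)) :
    (pvPush positions q s).length ≤ s.length + 1 := by
  unfold pvPush; split <;> simp

-- strict decrease of the untested count when a new position is marked tested
theorem pvDfs_dec {positions : List (List Int)} {tested : PySem.Set (List Int)} {curr : List Int}
    (hc : curr ∈ positions) (hnc : ¬ PySem.Set.contains tested curr = true) :
    (positions.filter (fun p => !PySem.Set.contains (PySem.Set.add tested curr) p)).length + 1 ≤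
      (positions.filter (fun p => !PySem.Set.contains tested p)).length := by
  have himp : ∀ a : List Int, (!PySem.Set.contains (PySem.Set.add tested curr) a) = true →
      (!PySem.Set.contains tested a) = true := by
    intro a ha
    rw [Bool.not_eq_true'] at ha ⊢
    by_contra hcon
    have h1 : a ∈ tested := (PySem.Set.contains_iff _ _).mp (Bool.not_eq_false _ ▸ hcon)
    have h2 : a ∈ PySem.Set.add tested curr := (PySem.Set.mem_add _ _ _).mpr (Or.inl h1)
    rw [(PySem.Set.contains_iff _ _).mpr h2] at ha
    exact absurd ha (by simp)
  have hsub := List.monotone_filter_right positions himp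
  have hin : curr ∈ positions.filter (fun p => !PySem.Set.contains tested p) := by
    refine List.mem_filter.mpr ⟨hc, ?_⟩
    rw [Bool.not_eq_true']
    exact Bool.eq_false_iff.mpr hnc
  have hout : curr ∉ positions.filter (fun p => !PySem.Set.contains (PySem.Set.add tested curr) p) := by
    intro h
    have := (List.mem_filter.mp h).2
    rw [Bool.not_eq_true'] at this
    have hmem : curr ∈ PySem.Set.add tested curr := (PySem.Set.mem_add _ _ _).mpr (Or.inr rfl)
    rw [(PySem.Set.contains_iff _ _).mpr hmem] at this
    exact absurd this (by simp)
  rcases eq_or_lt_of_le hsub.length_le with he | hl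
  · exact absurd (hsub.eq_of_length he ▸ hin) hout
  · omega

-- measure decrease of the DFS loop when a new position is marked tested (cited by decreasing_by)
theorem pvDfs_term {positions : PySem.Set (List Int)} {tested : PySem.Set (List Int)}
    {curr : List Int} {rest : List (List Int)} (a b c d : List Int)
    (hc : curr ∈ positions) (hnc : ¬ PySem.Set.contains tested curr = true) :
    5 * (positions.filter (fun p => !PySem.Set.contains (PySem.Set.add tested curr) p)).length +
        (pvPush positions a (pvPush positions b (pvPush positions c (pvPush positions d rest)))).length <
      5 * (positions.filter (fun p => !PySem.Set.contains tested p)).length +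
        (curr :: rest).length := by
  have h1 := pvPush_length positions a (pvPush positions b (pvPush positions c (pvPush positions d rest)))
  have h2 := pvPush_length positions b (pvPush positions c (pvPush positions d rest))
  have h3 := pvPush_length positions c (pvPush positions d rest)
  have h4 := pvPush_length positions d rest
  have hd := pvDfs_dec hc hnc
  simp only [List.length_cons]
  omega

theorem pvDfs_term' {positions : PySem.Set (List Int)} {tested : PySem.Set (List Int)}
    {curr : List Int} {rest : List (List Int)} :
    5 * (positions.filter (fun p => !PySem.Set.contains tested p)).length + rest.length <
      5 * (positions.filter (fun p => !PySem.Set.contains tested p)).length +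
        (curr :: rest).length := by
  simp only [List.length_cons]
  omega

-- the inner 'while len(stack) != 0' DFS loop of A; returns (early-True?, tested)
def pvDfs (positions : PySem.Set (List Int)) (g : Int) (tested : PySem.Set (List Int))
    (stack : List (List Int)) (cnt : Int)
    (hs : ∀ p ∈ stack, p ∈ positions) : Bool × PySem.Set (List Int) :=
  match stack, hs with
  | [], _ => (false, tested)
  | curr :: rest, hs =>
    if PySem.Set.contains tested curr then
      pvDfs positions g tested rest cnt (fun p hp => hs p (List.mem_cons_of_mem _ hp))
    else
      if cnt + 1 = g then (true, tested)
      else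
        pvDfs positions g (PySem.Set.add tested curr)
          (pvPush positions [PySem.List.pyGetD curr 0 0, PySem.List.pyGetD curr 1 0 + 1]
            (pvPush positions [PySem.List.pyGetD curr 0 0, PySem.List.pyGetD curr 1 0 - 1]
              (pvPush positions [PySem.List.pyGetD curr 0 0 + 1, PySem.List.pyGetD curr 1 0]
                (pvPush positions [PySem.List.pyGetD curr 0 0 - 1, PySem.List.pyGetD curr 1 0] rest))))
          (cnt + 1)
          (pvPush_mem (pvPush_mem (pvPush_mem (pvPush_mem
            (fun p hp => hs p (List.mem_cons_of_mem _ hp))))))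
termination_by 5 * (positions.filter (fun p => !PySem.Set.contains tested p)).length + stack.length
decreasing_by
  · exact pvDfs_term'
  · exact pvDfs_term _ _ _ _ (hs curr List.mem_cons_self) (by assumption)

-- the 'for robot in robots_positions' loop of A
def pvOuter (positions : PySem.Set (List Int)) (g : Int) :
    (L : List (List Int)) → (∀ p ∈ L, p ∈ positions) → PySem.Set (List Int) → Bool
  | [], _, _ => false
  | seed :: rest, hL, tested =>
    if PySem.Set.contains tested seed then
      pvOuter positions g rest (fun p hp => hL p (List.mem_cons_of_mem _ hp)) tested
    else
      let r := pvDfs positions g tested [seed] 0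
        (by intro p hp; simp only [List.mem_singleton] at hp; exact hp ▸ hL seed List.mem_cons_self)
      if r.1 then true
      else pvOuter positions g rest (fun p hp => hL p (List.mem_cons_of_mem _ hp)) r.2

def find_group (robots : List (List (List Int))) (group_size : Int) : Bool :=
  let positions := PySem.Set.ofList (robots.map (fun r => PySem.List.pyGetD r 0 []))
  pvOuter positions group_size positions (fun _ h => h) PySem.Set.empty

-- ===== PORT B =====
-- {q for p in frontier for q in nbrs(p) if q in remaining and q not in comp}
def pvGrow (remaining comp frontier : List (List Int)) : PySem.Set (List Int) :=
  PySem.Set.ofList ((frontier.flatMap pvNbrs).filter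
    (fun q => PySem.Set.contains remaining q && !PySem.Set.contains comp q))

theorem pvGrow_mem {remaining comp frontier : List (List Int)} {x : List Int}
    (hx : x ∈ pvGrow remaining comp frontier) :
    x ∈ remaining ∧ x ∉ comp ∧ ∃ p ∈ frontier, x ∈ pvNbrs p := by
  unfold pvGrow at hx
  have hx' := (PySem.Set.mem_ofList _ _).mp hx
  have h1 := (List.mem_filter.mp hx').1
  have h2 := (List.mem_filter.mp hx').2
  rcases List.mem_flatMap.mp h1 with ⟨p, hp, hxp⟩
  rw [Bool.and_eq_true, Bool.not_eq_true'] at h2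
  refine ⟨(PySem.Set.contains_iff _ _).mp h2.1, ?_, p, hp, hxp⟩
  intro hmem
  rw [(PySem.Set.contains_iff _ _).mpr hmem] at h2
  exact absurd h2.2 (by simp)

-- measure decrease of B's BFS loop (cited by decreasing_by)
theorem pvBfs_term {remaining : PySem.Set (List Int)} {comp : List (List Int)}
    {q : List Int} {fs : List (List Int)}
    (hcn : comp.Nodup) (hcr : ∀ x ∈ comp, x ∈ remaining) :
    Prod.Lex (fun a₁ a₂ => a₁ < a₂) (fun a₁ a₂ => a₁ < a₂)
      (remaining.length - (PySem.Set.union comp (pvGrow remaining comp (q :: fs))).length,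
        (pvGrow remaining comp (q :: fs)).length)
      (remaining.length - comp.length, (q :: fs).length) := by
  rcases heq : pvGrow remaining comp (q :: fs) with _ | ⟨y, ys⟩
  · have hu : PySem.Set.union comp ([] : List (List Int)) = comp := rfl
    rw [hu]
    exact Prod.Lex.right _ (by simp)
  · apply Prod.Lex.left
    have hyg : y ∈ pvGrow remaining comp (q :: fs) := by rw [heq]; exact List.mem_cons_self
    have hy := pvGrow_mem hyg
    have hun : (PySem.Set.union comp (pvGrow remaining comp (q :: fs))).Nodup :=
      PySem.Set.nodup_union _ _ hcn
    have hsubu : ∀ x ∈ PySem.Set.union comp (pvGrow remaining comp (q :: fs)), x ∈ remaining := by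
      intro x hx
      rcases (PySem.Set.mem_union _ _ _).mp hx with h | h
      · exact hcr x h
      · exact (pvGrow_mem h).1
    have hle : (PySem.Set.union comp (pvGrow remaining comp (q :: fs))).length ≤ remaining.length :=
      (List.Nodup.subperm hun hsubu).length_le
    have hyc : y ∈ PySem.Set.union comp (pvGrow remaining comp (q :: fs)) :=
      (PySem.Set.mem_union _ _ _).mpr (Or.inr hyg)
    have hcomp : comp.length < (PySem.Set.union comp (pvGrow remaining comp (q :: fs))).length := by
      have hnd : (y :: comp).Nodup := List.nodup_cons.mpr ⟨hy.2.1, hcn⟩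
      have hsub : y :: comp ⊆ PySem.Set.union comp (pvGrow remaining comp (q :: fs)) := by
        intro x hx
        rcases List.mem_cons.mp hx with h | h
        · exact h ▸ hyc
        · exact (PySem.Set.mem_union _ _ _).mpr (Or.inl h)
      have := (List.Nodup.subperm hnd hsub).length_le
      simp only [List.length_cons] at this
      omega
    rw [heq] at hle hcomp
    omega

-- B's inner 'while frontier' loop: grow the component level by level
def pvBfs (remaining : PySem.Set (List Int)) (comp frontier : List (List Int))
    (hcn : comp.Nodup) (hcr : ∀ x ∈ comp, x ∈ remaining) : PySem.Set (List Int) :=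
  match frontier with
  | [] => comp
  | q :: fs =>
    pvBfs remaining (PySem.Set.union comp (pvGrow remaining comp (q :: fs)))
      (pvGrow remaining comp (q :: fs))
      (PySem.Set.nodup_union _ _ hcn)
      (by
        intro x hx
        rcases (PySem.Set.mem_union _ _ _).mp hx with h | h
        · exact hcr x h
        · exact (pvGrow_mem h).1)
termination_by (remaining.length - comp.length, frontier.length)
decreasing_by
  exact pvBfs_term hcn hcr

-- B's outer 'while remaining' loop.  The 'if h :' test is a totality guard only: it always
-- holds, because the BFS component of seed contains seed (established with the spec lemmas).
def pvOuterB (g : Int) (remaining : PySem.Set (List Int)) (hrn : remaining.Nodup) : Bool :=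
  match remaining, hrn with
  | [], _ => false
  | seed :: rest, hrn =>
    let comp := pvBfs (seed :: rest) [seed] [seed] (List.nodup_singleton _)
      (by intro x hx; simp only [List.mem_singleton] at hx; exact hx ▸ List.mem_cons_self)
    if g ≤ (comp.length : Int) then true
    else
      if h : (PySem.Set.diff (seed :: rest) comp).length < (seed :: rest).length then
        pvOuterB g (PySem.Set.diff (seed :: rest) comp) (PySem.Set.nodup_diff _ _ hrn)
      else false
termination_by remaining.length
decreasing_by
  exact h

def find_group_alt (robots : List (List (List Int))) (group_size : Int) : Bool :=
  let positions := PySem.Set.ofList (robots.map (fun r => PySem.List.pyGetD r 0 []))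
  if group_size < 1 then false
  else pvOuterB group_size positions (PySem.Set.nodup_ofList _)

-- ===== PRECONDITION & SPEC =====
-- Pre_ excludes robots with an empty entry or a first position shorter than 2 (there A
-- raises IndexError, except that with group_size = 1 it returns True before indexing) and
-- inputs mixing length-2 positions with longer ones (there A's answer can depend on
-- CPython's set iteration order, which is accidental and not modelled).
def Pre_find_group (robots : List (List (List Int))) (group_size : Int) : Prop :=
  (∀ r ∈ robots, r ≠ []) ∧
  ((∀ r ∈ robots, (PySem.List.pyGetD r 0 []).length = 2) ∨
   (∀ r ∈ robots, 2 < (PySem.List.pyGetD r 0 []).length))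

instance (robots : List (List (List Int))) (group_size : Int) : Decidable (Pre_find_group robots group_size) := by
  unfold Pre_find_group; infer_instance

def pvWitness_find_group : List (List (List Int)) × Int := ([[[0, 0]], [[1, 0]]], 2)

def Spec_find_group (robots : List (List (List Int))) (group_size : Int) (out : Bool) : Prop :=
  out = find_group_alt robots group_size

instance (robots : List (List (List Int))) (group_size : Int) (out : Bool) : Decidable (Spec_find_group robots group_size out) := by
  unfold Spec_find_group; infer_instance

-- ===== CLAIM (what is proved, stated in full; the proofs are below) =====
def Claim_equal_find_group : Prop := ∀ (robots : List (List (List Int))) (group_size : Int), Dom_find_group robots group_size → Pre_find_group robots group_size → Spec_find_group robots group_size (find_group robots group_size)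

-- ===== LEMMAS AND PROOFS =====

-- the grid graph on a carrier list of positions
def pvAdj (P : List (List Int)) (p q : List Int) : Prop := p ∈ P ∧ q ∈ P ∧ q ∈ pvNbrs p

def pvReach (P : List (List Int)) (p q : List Int) : Prop := Relation.ReflTransGen (pvAdj P) p q

def pvReachSet (P : List (List Int)) (s : List Int) : Set (List Int) := {y | pvReach P s y}

def pvGood (P : List (List Int)) : Prop :=
  (∀ p q, pvAdj P p q → pvAdj P q p) ∧ (∀ p, ¬ pvAdj P p p)

-- "the DFS hit group_size while exploring s's component"
def pvHit (P : List (List Int)) (g : Int) (s : List Int) : Prop :=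
  0 < g ∧ g ≤ ((pvReachSet P s).ncard : Int)

theorem pvReach_mem {P : List (List Int)} {s y : List Int} (h : pvReach P s y) (hs : s ∈ P) :
    y ∈ P := by
  induction h with
  | refl => exact hs
  | tail _ hadj _ => exact hadj.2.1

theorem pvReach_symm {P : List (List Int)} (hg : pvGood P) {p q : List Int}
    (h : pvReach P p q) : pvReach P q p :=
  (Relation.ReflTransGen.symmetric (fun _ _ ha => hg.1 _ _ ha)) h

theorem pvReachSet_eq {P : List (List Int)} (hg : pvGood P) {s s' : List Int}
    (h : pvReach P s s') : pvReachSet P s = pvReachSet P s' := by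
  ext y
  constructor
  · intro hy; exact Relation.ReflTransGen.trans (pvReach_symm hg h) hy
  · intro hy; exact Relation.ReflTransGen.trans h hy

-- the restricted step relation of A's inner DFS and the set of positions it will newly visit
def pvStepR (P : List (List Int)) (T : List Int → Prop) (p q : List Int) : Prop :=
  pvAdj P p q ∧ ¬ T p ∧ ¬ T q

def pvNew (P : List (List Int)) (T : List Int → Prop) (stack : List (List Int)) : Set (List Int) :=
  {y | ¬ T y ∧ ∃ x ∈ stack, ¬ T x ∧ Relation.ReflTransGen (pvStepR P T) x y}

theorem pvNew_ext {P : List (List Int)} {T T' : List Int → Prop} {s s' : List (List Int)}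
    (hT : ∀ x, T x ↔ T' x) (hs : ∀ x, x ∈ s ↔ x ∈ s') : pvNew P T s = pvNew P T' s' := by
  have hTT : T = T' := funext fun x => propext (hT x)
  subst hTT
  unfold pvNew
  ext y
  constructor
  · rintro ⟨h1, x, hx, h2⟩; exact ⟨h1, x, (hs x).mp hx, h2⟩
  · rintro ⟨h1, x, hx, h2⟩; exact ⟨h1, x, (hs x).mpr hx, h2⟩

theorem pvNew_nil {P : List (List Int)} {T : List Int → Prop} : pvNew P T [] = ∅ := by
  unfold pvNew; ext y; simp

theorem pvNew_cons_tested {P : List (List Int)} {T : List Int → Prop} {curr : List Int}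
    {rest : List (List Int)} (h : T curr) : pvNew P T (curr :: rest) = pvNew P T rest := by
  unfold pvNew
  ext y
  simp only [Set.mem_setOf_eq, List.mem_cons]
  constructor
  · rintro ⟨h1, x, hx | hx, h2, h3⟩
    · exact absurd h (hx ▸ h2)
    · exact ⟨h1, x, hx, h2, h3⟩
  · rintro ⟨h1, x, hx, h2, h3⟩
    exact ⟨h1, x, Or.inr hx, h2, h3⟩

theorem pvNew_subset {P : List (List Int)} {T : List Int → Prop} {stack : List (List Int)} :
    pvNew P T stack ⊆ {y | y ∈ stack ∨ y ∈ P} := by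
  rintro y ⟨h1, x, hx, h2, h3⟩
  induction h3 with
  | refl => exact Or.inl hx
  | tail _ hstep _ => exact Or.inr hstep.1.2.1

theorem pvNew_finite {P : List (List Int)} {T : List Int → Prop} {stack : List (List Int)} :
    (pvNew P T stack).Finite := by
  apply (((List.finite_toSet stack).union (List.finite_toSet P)).subset)
  intro y hy
  exact pvNew_subset hy

-- splitting a restricted path at the first visit of a distinguished vertex c
theorem pvPath_avoid {P : List (List Int)} {T : List Int → Prop} {c x y : List Int}
    (h : Relation.ReflTransGen (pvStepR P T) x y) (hy : y ≠ c) :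
    Relation.ReflTransGen (pvStepR P (fun a => T a ∨ a = c)) x y ∨
      ∃ z, pvStepR P T c z ∧ z ≠ c ∧
        Relation.ReflTransGen (pvStepR P (fun a => T a ∨ a = c)) z y := by
  induction h using Relation.ReflTransGen.head_induction_on with
  | refl => exact Or.inl Relation.ReflTransGen.refl
  | head hstep _ ih =>
    rename_i x w _
    have hnotfromc : ∀ v, Relation.ReflTransGen (pvStepR P (fun a => T a ∨ a = c)) v y → v = c → False := by
      intro v hv hvc
      subst hvc
      rcases Relation.ReflTransGen.cases_head hv with he | ⟨u, hu, _⟩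
      · exact hy he.symm
      · exact hu.2.1 (Or.inr rfl)
    rcases ih with hl | ⟨z, hz1, hz2, hz3⟩
    · by_cases hwc : w = c
      · exact absurd (hwc ▸ rfl) (fun h => hnotfromc w hl h)
      · by_cases hxc : x = c
        · exact Or.inr ⟨w, hxc ▸ hstep, hwc, hl⟩
        · refine Or.inl (Relation.ReflTransGen.head ?_ hl)
          exact ⟨hstep.1, fun h => by rcases h with h | h; exact hstep.2.1 h; exact hxc h,
            fun h => by rcases h with h | h; exact hstep.2.2 h; exact hwc h⟩
    · exact Or.inr ⟨z, hz1, hz2, hz3⟩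

-- the set of positions the DFS will newly visit, after popping an untested position
theorem pvNew_step {P : List (List Int)} {T : List Int → Prop} {curr : List Int}
    (hcP : curr ∈ P) (hT : ¬ T curr) {rest s' : List (List Int)}
    (hs' : ∀ x, x ∈ s' ↔ (x ∈ pvNbrs curr ∧ x ∈ P) ∨ x ∈ rest) :
    pvNew P T (curr :: rest) = insert curr (pvNew P (fun a => T a ∨ a = curr) s') ∧
      curr ∉ pvNew P (fun a => T a ∨ a = curr) s' := by
  have hmono : ∀ a b, pvStepR P (fun a => T a ∨ a = curr) a b → pvStepR P T a b := by
    rintro a b ⟨h1, h2, h3⟩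
    exact ⟨h1, fun h => h2 (Or.inl h), fun h => h3 (Or.inl h)⟩
  constructor
  · ext y
    simp only [Set.mem_insert_iff]
    constructor
    · rintro ⟨h1, x, hx, hx2, hpath⟩
      by_cases hyc : y = curr
      · exact Or.inl hyc
      right
      by_cases hxc : x = curr
      · subst hxc
        rcases pvPath_avoid hpath hyc with hl | ⟨z, hz1, hz2, hz3⟩
        · rcases Relation.ReflTransGen.cases_head hl with he | ⟨u, hu, _⟩
          · exact absurd he.symm hyc
          · exact absurd (Or.inr rfl) hu.2.1
        · refine ⟨fun h => (by rcases h with h | h; exact h1 h; exact hyc h), z,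
            (hs' z).mpr (Or.inl ⟨hz1.1.2.2, hz1.1.2.1⟩), fun h => (by rcases h with h | h; exact hz1.2.2 h; exact hz2 h), hz3⟩
      · rcases List.mem_cons.mp hx with he | hrest
        · exact absurd he hxc
        rcases pvPath_avoid hpath hyc with hl | ⟨z, hz1, hz2, hz3⟩
        · exact ⟨fun h => (by rcases h with h | h; exact h1 h; exact hyc h), x,
            (hs' x).mpr (Or.inr hrest), fun h => (by rcases h with h | h; exact hx2 h; exact hxc h), hl⟩
        · exact ⟨fun h => (by rcases h with h | h; exact h1 h; exact hyc h), z,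
            (hs' z).mpr (Or.inl ⟨hz1.1.2.2, hz1.1.2.1⟩), fun h => (by rcases h with h | h; exact hz1.2.2 h; exact hz2 h), hz3⟩
    · rintro (hyc | ⟨h1, x, hx, hx2, hpath⟩)
      · exact ⟨hyc ▸ hT, curr, List.mem_cons_self, hT, hyc ▸ Relation.ReflTransGen.refl⟩
      have hpath' : Relation.ReflTransGen (pvStepR P T) x y :=
        Relation.ReflTransGen.mono hmono hpath
      have h1' : ¬ T y := fun h => h1 (Or.inl h)
      have hx2' : ¬ T x := fun h => hx2 (Or.inl h)
      rcases (hs' x).mp hx with ⟨hnb, hxP⟩ | hrest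
      · refine ⟨h1', curr, List.mem_cons_self, hT, Relation.ReflTransGen.head ?_ hpath'⟩
        exact ⟨⟨hcP, hxP, hnb⟩, hT, hx2'⟩
      · exact ⟨h1', x, List.mem_cons_of_mem _ hrest, hx2', hpath'⟩
  · rintro ⟨h1, _⟩
    exact h1 (Or.inr rfl)

-- from an untested seed, with tested closed under adjacency, the DFS visits exactly the component
theorem pvNew_closed {P : List (List Int)} (hg : pvGood P) {T : List Int → Prop} {s : List Int}
    (hcl : ∀ x y, T x → pvAdj P x y → T y) (hsP : s ∈ P) (hsT : ¬ T s) :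
    pvNew P T [s] = pvReachSet P s := by
  ext y
  constructor
  · rintro ⟨h1, x, hx, hx2, hpath⟩
    simp only [List.mem_singleton] at hx
    subst hx
    exact Relation.ReflTransGen.mono (fun a b h => h.1) hpath
  · intro hy
    have aux : ∀ y, pvReach P s y → Relation.ReflTransGen (pvStepR P T) s y ∧ ¬ T y := by
      intro y hy
      induction hy with
      | refl => exact ⟨Relation.ReflTransGen.refl, hsT⟩
      | tail _ hadj ih =>
        rename_i b y' _
        have hTy : ¬ T y' := fun h => ih.2 (hcl y' b h (hg.1 _ _ hadj))
        exact ⟨Relation.ReflTransGen.tail ih.1 ⟨hadj, ih.2, hTy⟩, hTy⟩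
    rcases aux y hy with ⟨hp, hTy⟩
    exact ⟨hTy, s, List.mem_singleton.mpr rfl, hsT, hp⟩

theorem pvNodup_ncard {l : List (List Int)} (h : l.Nodup) : ({y | y ∈ l} : Set (List Int)).ncard = l.length := by
  have h1 : ({y | y ∈ l} : Set (List Int)) = ↑l.toFinset := by ext y; simp
  rw [h1, Set.ncard_coe_finset, List.toFinset_card_of_nodup h]

-- membership in the stack after A's four conditional pushes
theorem pvPushes_mem {positions : PySem.Set (List Int)} {curr : List Int} {rest : List (List Int)} :
    ∀ x, x ∈ pvPush positions [PySem.List.pyGetD curr 0 0, PySem.List.pyGetD curr 1 0 + 1]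
            (pvPush positions [PySem.List.pyGetD curr 0 0, PySem.List.pyGetD curr 1 0 - 1]
              (pvPush positions [PySem.List.pyGetD curr 0 0 + 1, PySem.List.pyGetD curr 1 0]
                (pvPush positions [PySem.List.pyGetD curr 0 0 - 1, PySem.List.pyGetD curr 1 0] rest))) ↔
      (x ∈ pvNbrs curr ∧ x ∈ positions) ∨ x ∈ rest := by
  intro x
  simp only [pvPush, pvNbrs]
  split_ifs with h1 h2 h3 h4 <;>
    simp_all [PySem.Set.contains_iff, List.mem_cons] <;> aesop

-- A's inner DFS loop: early True iff the counter passes through g; otherwise it marks exactly pvNew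
theorem pvDfs_spec {positions : PySem.Set (List Int)} (g : Int) :
    ∀ (tested : PySem.Set (List Int)) (stack : List (List Int)) (cnt : Int)
      (hs : ∀ p ∈ stack, p ∈ positions),
      ((pvDfs positions g tested stack cnt hs).1 = true ↔
        cnt < g ∧ g ≤ cnt + ((pvNew positions (· ∈ tested) stack).ncard : Int)) ∧
      ((pvDfs positions g tested stack cnt hs).1 = false →
        ∀ x, x ∈ (pvDfs positions g tested stack cnt hs).2 ↔
          x ∈ tested ∨ x ∈ pvNew positions (· ∈ tested) stack) := by
  intro tested stack cnt hs
  fun_induction pvDfs positions g tested stack cnt hs with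
  | case1 tested cnt =>
    refine ⟨?_, fun _ x => ?_⟩
    · rw [pvNew_nil]
      simp only [Set.ncard_empty, Nat.cast_zero, add_zero]
      constructor
      · intro h; exact absurd h (by simp)
      · intro ⟨h1, h2⟩; omega
    · rw [pvNew_nil]
      simp
  | case2 tested cnt curr rest hs1 hc hs2 ih =>
    have hcm : curr ∈ tested := (PySem.Set.contains_iff _ _).mp hc
    have he : pvNew positions (· ∈ tested) (curr :: rest) = pvNew positions (· ∈ tested) rest :=
      pvNew_cons_tested hcm
    simpa only [he] using ih
  | case3 tested cnt curr rest hs1 hc hcnt hs2 =>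
    have hnT : ¬ curr ∈ tested := fun hm => hc ((PySem.Set.contains_iff _ _).mpr hm)
    refine ⟨?_, fun hf => absurd hf (by simp)⟩
    refine iff_of_true rfl ⟨by omega, ?_⟩
    have hcur : curr ∈ pvNew positions (· ∈ tested) (curr :: rest) :=
      ⟨hnT, curr, List.mem_cons_self, hnT, Relation.ReflTransGen.refl⟩
    have hpos : 0 < (pvNew positions (· ∈ tested) (curr :: rest)).ncard :=
      (Set.ncard_pos pvNew_finite).mpr ⟨curr, hcur⟩
    omega
  | case4 tested cnt curr rest hs1 hc hcnt hs2 ih =>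
    have hnT : ¬ curr ∈ tested := fun hm => hc ((PySem.Set.contains_iff _ _).mpr hm)
    have hcP : curr ∈ positions := hs1 curr List.mem_cons_self
    obtain ⟨hins, hnot⟩ := pvNew_step (T := (· ∈ tested)) hcP hnT (rest := rest) pvPushes_mem
    have hext : pvNew positions (· ∈ PySem.Set.add tested curr)
          (pvPush positions [PySem.List.pyGetD curr 0 0, PySem.List.pyGetD curr 1 0 + 1]
            (pvPush positions [PySem.List.pyGetD curr 0 0, PySem.List.pyGetD curr 1 0 - 1]
              (pvPush positions [PySem.List.pyGetD curr 0 0 + 1, PySem.List.pyGetD curr 1 0]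
                (pvPush positions [PySem.List.pyGetD curr 0 0 - 1, PySem.List.pyGetD curr 1 0] rest)))) =
        pvNew positions (fun a => a ∈ tested ∨ a = curr)
          (pvPush positions [PySem.List.pyGetD curr 0 0, PySem.List.pyGetD curr 1 0 + 1]
            (pvPush positions [PySem.List.pyGetD curr 0 0, PySem.List.pyGetD curr 1 0 - 1]
              (pvPush positions [PySem.List.pyGetD curr 0 0 + 1, PySem.List.pyGetD curr 1 0]
                (pvPush positions [PySem.List.pyGetD curr 0 0 - 1, PySem.List.pyGetD curr 1 0] rest)))) :=
      pvNew_ext (fun x => PySem.Set.mem_add _ _ _) (fun x => Iff.rfl)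
    rw [hext] at ih
    have hcard : (pvNew positions (· ∈ tested) (curr :: rest)).ncard =
        (pvNew positions (fun a => a ∈ tested ∨ a = curr)
          (pvPush positions [PySem.List.pyGetD curr 0 0, PySem.List.pyGetD curr 1 0 + 1]
            (pvPush positions [PySem.List.pyGetD curr 0 0, PySem.List.pyGetD curr 1 0 - 1]
              (pvPush positions [PySem.List.pyGetD curr 0 0 + 1, PySem.List.pyGetD curr 1 0]
                (pvPush positions [PySem.List.pyGetD curr 0 0 - 1, PySem.List.pyGetD curr 1 0] rest))))).ncard + 1 := by
      rw [hins, Set.ncard_insert_of_notMem hnot pvNew_finite]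
    constructor
    · refine (ih.1).trans ?_
      rw [hcard]
      push_cast
      omega
    · intro hf x
      rw [(ih.2 hf) x, hins]
      simp only [Set.mem_insert_iff, PySem.Set.mem_add]
      tauto

-- A's outer loop
theorem pvOuter_spec {positions : PySem.Set (List Int)} (hg : pvGood positions) (g : Int) :
    ∀ (L : List (List Int)) (hL : ∀ p ∈ L, p ∈ positions) (tested : PySem.Set (List Int)),
      (∀ x ∈ tested, x ∈ positions) →
      (∀ x y, x ∈ tested → pvAdj positions x y → y ∈ tested) →
      (∀ x ∈ tested, ¬ pvHit positions g x) →
      (pvOuter positions g L hL tested = true ↔ ∃ s ∈ L, pvHit positions g s) := by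
  intro L hL tested h1 h2 h3
  revert h1 h2 h3
  fun_induction pvOuter positions g L hL tested with
  | case1 =>
    intro _ _ _
    simp
  | case2 seed rest hL tested hc ih =>
    intro h1 h2 h3
    have hcm : seed ∈ tested := (PySem.Set.contains_iff _ _).mp hc
    rw [ih h1 h2 h3]
    constructor
    · rintro ⟨s, hs, hh⟩; exact ⟨s, List.mem_cons_of_mem _ hs, hh⟩
    · rintro ⟨s, hs, hh⟩
      rcases List.mem_cons.mp hs with rfl | hs'
      · exact absurd hh (h3 s hcm)
      · exact ⟨s, hs', hh⟩
  | case3 seed rest hL tested hc r hr =>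
    intro h1 h2 h3
    have hnT : seed ∉ tested := fun hm => hc ((PySem.Set.contains_iff _ _).mpr hm)
    have hseedP : seed ∈ positions := hL seed List.mem_cons_self
    have hdfs := pvDfs_spec g tested [seed] 0
      (by intro p hp; simp only [List.mem_singleton] at hp; exact hp ▸ hseedP)
    have key : pvNew positions (· ∈ tested) [seed] = pvReachSet positions seed :=
      pvNew_closed hg (fun x y hx ha => h2 x y hx ha) hseedP hnT
    have hiff := hdfs.1
    rw [key] at hiff
    have hhit := hiff.mp hr
    refine iff_of_true rfl ⟨seed, List.mem_cons_self, hhit.1, ?_⟩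
    have := hhit.2
    omega
  | case4 seed rest hL tested hc r hr ih =>
    intro h1 h2 h3
    have hnT : seed ∉ tested := fun hm => hc ((PySem.Set.contains_iff _ _).mpr hm)
    have hseedP : seed ∈ positions := hL seed List.mem_cons_self
    have hdfs := pvDfs_spec g tested [seed] 0
      (by intro p hp; simp only [List.mem_singleton] at hp; exact hp ▸ hseedP)
    have key : pvNew positions (· ∈ tested) [seed] = pvReachSet positions seed :=
      pvNew_closed hg (fun x y hx ha => h2 x y hx ha) hseedP hnT
    have hfalse : r.1 = false := Bool.not_eq_true _ ▸ (Bool.eq_false_iff.mpr hr)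
    have hiff := hdfs.1
    rw [key] at hiff
    have hmem := hdfs.2 hfalse
    have hmem' : ∀ x, x ∈ r.2 ↔ x ∈ tested ∨ x ∈ pvReachSet positions seed := by
      intro x; rw [hmem x, key]
    have hnohit : ¬ pvHit positions g seed := by
      rintro ⟨ha, hb⟩
      have : r.1 = true := hiff.mpr ⟨ha, by omega⟩
      rw [hfalse] at this
      exact absurd this (by simp)
    have h1' : ∀ x ∈ r.2, x ∈ positions := by
      intro x hx
      rcases (hmem' x).mp hx with h | h
      · exact h1 x h
      · exact pvReach_mem h hseedP
    have h2' : ∀ x y, x ∈ r.2 → pvAdj positions x y → y ∈ r.2 := by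
      intro x y hx ha
      rcases (hmem' x).mp hx with h | h
      · exact (hmem' y).mpr (Or.inl (h2 x y h ha))
      · exact (hmem' y).mpr (Or.inr (Relation.ReflTransGen.tail h ha))
    have h3' : ∀ x ∈ r.2, ¬ pvHit positions g x := by
      intro x hx
      rcases (hmem' x).mp hx with h | h
      · exact h3 x h
      · intro hhit
        have hsets : pvReachSet positions seed = pvReachSet positions x := pvReachSet_eq hg h
        exact hnohit ⟨hhit.1, by unfold pvHit at hhit; rw [hsets]; exact hhit.2⟩
    rw [ih h1' h2' h3']
    constructor
    · rintro ⟨s, hs, hh⟩; exact ⟨s, List.mem_cons_of_mem _ hs, hh⟩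
    · rintro ⟨s, hs, hh⟩
      rcases List.mem_cons.mp hs with rfl | hs'
      · exact absurd hh hnohit
      · exact ⟨s, hs', hh⟩

theorem pvA_char {robots : List (List (List Int))} {g : Int}
    (hg : pvGood (PySem.Set.ofList (robots.map (fun r => PySem.List.pyGetD r 0 [])))) :
    (find_group robots g = true ↔
      ∃ s ∈ PySem.Set.ofList (robots.map (fun r => PySem.List.pyGetD r 0 [])),
        pvHit (PySem.Set.ofList (robots.map (fun r => PySem.List.pyGetD r 0 []))) g s) := by
  unfold find_group
  exact pvOuter_spec hg g _ _ _ (by simp [PySem.Set.empty]) (by simp [PySem.Set.empty]) (by simp [PySem.Set.empty])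

theorem pvGrow_mem_iff {remaining comp frontier : List (List Int)} {x : List Int} :
    x ∈ pvGrow remaining comp frontier ↔
      x ∈ remaining ∧ x ∉ comp ∧ ∃ p ∈ frontier, x ∈ pvNbrs p := by
  unfold pvGrow
  rw [PySem.Set.mem_ofList]
  simp only [List.mem_filter, List.mem_flatMap, Bool.and_eq_true, Bool.not_eq_true']
  constructor
  · rintro ⟨⟨p, hp, hxp⟩, hrem, hnc⟩
    refine ⟨(PySem.Set.contains_iff _ _).mp hrem, ?_, p, hp, hxp⟩
    intro hm
    rw [(PySem.Set.contains_iff _ _).mpr hm] at hnc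
    exact absurd hnc (by simp)
  · rintro ⟨hrem, hnc, p, hp, hxp⟩
    refine ⟨⟨p, hp, hxp⟩, (PySem.Set.contains_iff _ _).mpr hrem, ?_⟩
    rw [Bool.eq_false_iff]
    intro hc
    exact hnc ((PySem.Set.contains_iff _ _).mp hc)

-- B's inner BFS loop computes exactly the closure of comp
theorem pvBfs_spec (remaining : PySem.Set (List Int)) (comp frontier : List (List Int))
    (hcn : comp.Nodup) (hcr : ∀ x ∈ comp, x ∈ remaining) :
    (∀ x ∈ frontier, x ∈ comp) →
    (∀ x ∈ comp, x ∉ frontier → ∀ q, pvAdj remaining x q → q ∈ comp) →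
    ∀ y, y ∈ pvBfs remaining comp frontier hcn hcr ↔ ∃ x ∈ comp, pvReach remaining x y := by
  fun_induction pvBfs remaining comp frontier hcn hcr with
  | case1 comp hcn hcr =>
    intro hf hcl y
    constructor
    · intro hy; exact ⟨y, hy, Relation.ReflTransGen.refl⟩
    · rintro ⟨x, hx, hreach⟩
      induction hreach with
      | refl => exact hx
      | tail _ ha ih => exact hcl _ ih (List.not_mem_nil) _ ha
  | case2 comp hcn hcr q fs ih =>
    intro hf hcl
    have hf' : ∀ x ∈ pvGrow remaining comp (q :: fs),
        x ∈ PySem.Set.union comp (pvGrow remaining comp (q :: fs)) := by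
      intro x hx; exact (PySem.Set.mem_union _ _ _).mpr (Or.inr hx)
    have hcl' : ∀ x ∈ PySem.Set.union comp (pvGrow remaining comp (q :: fs)),
        x ∉ pvGrow remaining comp (q :: fs) → ∀ z, pvAdj remaining x z →
          z ∈ PySem.Set.union comp (pvGrow remaining comp (q :: fs)) := by
      intro x hx hxng z hadj
      rcases (PySem.Set.mem_union _ _ _).mp hx with hxc | hxg
      · by_cases hxf : x ∈ q :: fs
        · by_cases hzc : z ∈ comp
          · exact (PySem.Set.mem_union _ _ _).mpr (Or.inl hzc)
          · refine (PySem.Set.mem_union _ _ _).mpr (Or.inr ?_)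
            exact pvGrow_mem_iff.mpr ⟨hadj.2.1, hzc, x, hxf, hadj.2.2⟩
        · exact (PySem.Set.mem_union _ _ _).mpr (Or.inl (hcl x hxc hxf z hadj))
      · exact absurd hxg hxng
    intro y
    rw [ih hf' hcl' y]
    constructor
    · rintro ⟨x, hx, hreach⟩
      rcases (PySem.Set.mem_union _ _ _).mp hx with hxc | hxg
      · exact ⟨x, hxc, hreach⟩
      · rcases pvGrow_mem_iff.mp hxg with ⟨hxr, hxnc, p, hp, hnb⟩
        have hpc : p ∈ comp := hf p hp
        refine ⟨p, hpc, Relation.ReflTransGen.head ⟨hcr p hpc, hxr, hnb⟩ hreach⟩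
    · rintro ⟨x, hx, hreach⟩
      exact ⟨x, (PySem.Set.mem_union _ _ _).mpr (Or.inl hx), hreach⟩

theorem pvBfs_nodup (remaining : PySem.Set (List Int)) (comp frontier : List (List Int))
    (hcn : comp.Nodup) (hcr : ∀ x ∈ comp, x ∈ remaining) :
    (pvBfs remaining comp frontier hcn hcr).Nodup := by
  fun_induction pvBfs with
  | case1 _ hcn _ => exact hcn
  | case2 remaining comp q fs h ih => exact ih

-- the totality guard of pvOuterB really holds when seed lies in comp
theorem pvDiff_lt {seed : List Int} {rest comp : List (List Int)}
    (hrn : (seed :: rest).Nodup) (hseed : seed ∈ comp) :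
    (PySem.Set.diff (seed :: rest) comp).length < (seed :: rest).length := by
  have hnd : (PySem.Set.diff (seed :: rest) comp).Nodup := PySem.Set.nodup_diff _ _ hrn
  have hnotin : seed ∉ PySem.Set.diff (seed :: rest) comp := by
    intro h
    exact absurd hseed ((PySem.Set.mem_diff _ _ _).mp h).2
  have hsub : seed :: PySem.Set.diff (seed :: rest) comp ⊆ seed :: rest := by
    intro x hx
    rcases List.mem_cons.mp hx with h | h
    · exact h ▸ List.mem_cons_self
    · exact ((PySem.Set.mem_diff _ _ _).mp h).1
  have := (List.Nodup.subperm (List.nodup_cons.mpr ⟨hnotin, hnd⟩) hsub).length_le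
  simp only [List.length_cons] at this ⊢
  omega

-- membership in the BFS component from seed equals P-reachability from seed, and its length is the
-- component's cardinality, provided the remaining positions are closed under adjacency in P
theorem pvBridge {P : List (List Int)} (seed : List Int) (rest : List (List Int))
    (h1 : ∀ x ∈ seed :: rest, x ∈ P)
    (h2 : ∀ x y, x ∈ seed :: rest → pvAdj P x y → y ∈ seed :: rest) :
    (∀ y, y ∈ pvBfs (seed :: rest) [seed] [seed] (List.nodup_singleton _)
        (by intro x hx; simp only [List.mem_singleton] at hx; exact hx ▸ List.mem_cons_self) ↔
      pvReach P seed y) ∧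
    ((pvBfs (seed :: rest) [seed] [seed] (List.nodup_singleton _)
        (by intro x hx; simp only [List.mem_singleton] at hx; exact hx ▸ List.mem_cons_self)).length : Int) =
      ((pvReachSet P seed).ncard : Int) := by
  have hspec := pvBfs_spec (seed :: rest) [seed] [seed] (List.nodup_singleton _)
    (by intro x hx; simp only [List.mem_singleton] at hx; exact hx ▸ List.mem_cons_self)
    (fun x hx => hx)
    (by intro x hx hnx; exact absurd hx hnx)
  have hreach_iff : ∀ y, pvReach (seed :: rest) seed y ↔ pvReach P seed y := by
    intro y
    constructor
    · intro h
      exact Relation.ReflTransGen.mono (fun a b hab => ⟨h1 a hab.1, h1 b hab.2.1, hab.2.2⟩) h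
    · intro h
      have aux : ∀ y, pvReach P seed y → pvReach (seed :: rest) seed y ∧ y ∈ seed :: rest := by
        intro y hy
        induction hy with
        | refl => exact ⟨Relation.ReflTransGen.refl, List.mem_cons_self⟩
        | tail _ hadj ih =>
          rename_i b y' _
          have hy' : y' ∈ seed :: rest := h2 b y' ih.2 hadj
          exact ⟨Relation.ReflTransGen.tail ih.1 ⟨ih.2, hy', hadj.2.2⟩, hy'⟩
      exact (aux y h).1
  have hmem : ∀ y, y ∈ pvBfs (seed :: rest) [seed] [seed] (List.nodup_singleton _)
      (by intro x hx; simp only [List.mem_singleton] at hx; exact hx ▸ List.mem_cons_self) ↔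
      pvReach P seed y := by
    intro y
    rw [hspec y]
    constructor
    · rintro ⟨x, hx, hr⟩
      simp only [List.mem_singleton] at hx
      exact (hreach_iff y).mp (hx ▸ hr)
    · intro h
      exact ⟨seed, List.mem_singleton.mpr rfl, (hreach_iff y).mpr h⟩
  refine ⟨hmem, ?_⟩
  have hnd := pvBfs_nodup (seed :: rest) [seed] [seed] (List.nodup_singleton _)
    (by intro x hx; simp only [List.mem_singleton] at hx; exact hx ▸ List.mem_cons_self)
  have hset : ({y | y ∈ pvBfs (seed :: rest) [seed] [seed] (List.nodup_singleton _)
      (by intro x hx; simp only [List.mem_singleton] at hx; exact hx ▸ List.mem_cons_self)} :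
        Set (List Int)) = pvReachSet P seed := by
    ext y
    exact hmem y
  rw [← pvNodup_ncard hnd, hset]

-- B's outer loop
theorem pvOuterB_spec {P : List (List Int)} (hg : pvGood P) {g : Int} (hg1 : 1 ≤ g) :
    ∀ (remaining : PySem.Set (List Int)) (hrn : remaining.Nodup),
      (∀ x ∈ remaining, x ∈ P) →
      (∀ x y, x ∈ remaining → pvAdj P x y → y ∈ remaining) →
      (∀ x ∈ P, x ∉ remaining → ¬ pvHit P g x) →
      (pvOuterB g remaining hrn = true ↔ ∃ s ∈ remaining, pvHit P g s) := by
  intro remaining hrn h1 h2 h3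
  revert h1 h2 h3
  fun_induction pvOuterB g remaining hrn with
  | case1 =>
    intro _ _ _
    simp
  | case2 seed rest hrn1 comp hle hrn2 =>
    intro h1 h2 h3
    have hbr := pvBridge (P := P) seed rest h1 h2
    have hceq : comp = pvBfs (seed :: rest) [seed] [seed] (List.nodup_singleton _)
        (by intro x hx; simp only [List.mem_singleton] at hx; exact hx ▸ List.mem_cons_self) := rfl
    rw [hceq] at hle
    refine iff_of_true rfl ⟨seed, List.mem_cons_self, by omega, ?_⟩
    rw [← hbr.2]
    omega
  | case3 seed rest hrn1 comp hle hguard hrn2 ih =>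
    intro h1 h2 h3
    have hbr := pvBridge (P := P) seed rest h1 h2
    have hceq : comp = pvBfs (seed :: rest) [seed] [seed] (List.nodup_singleton _)
        (by intro x hx; simp only [List.mem_singleton] at hx; exact hx ▸ List.mem_cons_self) := rfl
    rw [hceq] at hle
    have hcompP : ∀ y, y ∈ comp ↔ pvReach P seed y := by rw [hceq]; exact hbr.1
    have hnohit : ∀ x ∈ comp, ¬ pvHit P g x := by
      intro x hx hhit
      have hrx : pvReach P seed x := (hcompP x).mp hx
      have hsets : pvReachSet P seed = pvReachSet P x := pvReachSet_eq hg hrx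
      have : g ≤ ((pvReachSet P seed).ncard : Int) := by
        unfold pvHit at hhit
        rw [hsets]
        exact hhit.2
      rw [← hbr.2] at this
      rw [← hceq] at this
      rw [hceq] at this
      omega
    have h1' : ∀ x ∈ PySem.Set.diff (seed :: rest) comp, x ∈ P := by
      intro x hx
      exact h1 x ((PySem.Set.mem_diff _ _ _).mp hx).1
    have h2' : ∀ x y, x ∈ PySem.Set.diff (seed :: rest) comp → pvAdj P x y →
        y ∈ PySem.Set.diff (seed :: rest) comp := by
      intro x y hx hadj
      rcases (PySem.Set.mem_diff _ _ _).mp hx with ⟨hxr, hxnc⟩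
      refine (PySem.Set.mem_diff _ _ _).mpr ⟨h2 x y hxr hadj, ?_⟩
      intro hyc
      have hry : pvReach P seed y := (hcompP y).mp hyc
      have hrx : pvReach P seed x := Relation.ReflTransGen.tail hry (hg.1 _ _ hadj)
      exact hxnc ((hcompP x).mpr hrx)
    have h3' : ∀ x ∈ P, x ∉ PySem.Set.diff (seed :: rest) comp → ¬ pvHit P g x := by
      intro x hxP hxn
      by_cases hxr : x ∈ seed :: rest
      · have hxc : x ∈ comp := by
          by_contra hxc
          exact hxn ((PySem.Set.mem_diff _ _ _).mpr ⟨hxr, hxc⟩)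
        exact hnohit x hxc
      · exact h3 x hxP hxr
    rw [ih h1' h2' h3']
    constructor
    · rintro ⟨s, hs, hh⟩
      exact ⟨s, ((PySem.Set.mem_diff _ _ _).mp hs).1, hh⟩
    · rintro ⟨s, hs, hh⟩
      by_cases hsc : s ∈ comp
      · exact absurd hh (hnohit s hsc)
      · exact ⟨s, (PySem.Set.mem_diff _ _ _).mpr ⟨hs, hsc⟩, hh⟩
  | case4 seed rest hrn1 comp hle hguard hrn2 =>
    intro h1 h2 h3
    have hbr := pvBridge (P := P) seed rest h1 h2
    have hceq : comp = pvBfs (seed :: rest) [seed] [seed] (List.nodup_singleton _)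
        (by intro x hx; simp only [List.mem_singleton] at hx; exact hx ▸ List.mem_cons_self) := rfl
    have hseed : seed ∈ comp := by
      rw [hceq]
      exact (hbr.1 seed).mpr Relation.ReflTransGen.refl
    exact absurd (pvDiff_lt hrn1 hseed) hguard

theorem pvB_char {robots : List (List (List Int))} {g : Int}
    (hg : pvGood (PySem.Set.ofList (robots.map (fun r => PySem.List.pyGetD r 0 [])))) :
    (find_group_alt robots g = true ↔
      ∃ s ∈ PySem.Set.ofList (robots.map (fun r => PySem.List.pyGetD r 0 [])),
        pvHit (PySem.Set.ofList (robots.map (fun r => PySem.List.pyGetD r 0 []))) g s) := by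
  unfold find_group_alt
  show (if g < 1 then false
    else pvOuterB g (PySem.Set.ofList (robots.map (fun r => PySem.List.pyGetD r 0 [])))
      (PySem.Set.nodup_ofList _)) = true ↔ _
  split_ifs with hlt
  · constructor
    · intro h; exact absurd h (by simp)
    · rintro ⟨s, _, h0, _⟩; omega
  · exact pvOuterB_spec hg (by omega) _ (PySem.Set.nodup_ofList _)
      (fun x hx => hx)
      (fun x y _ hadj => hadj.2.1)
      (fun x hxP hxn => absurd hxP hxn)

-- Pre_ gives a well-behaved graph: all positions of length 2, or all longer than 2
theorem pvNbrs_pair (a b : Int) : pvNbrs [a, b] = [[a - 1, b], [a + 1, b], [a, b - 1], [a, b + 1]] := by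
  have h0 : PySem.List.pyGetD [a, b] 0 0 = a := by
    simpa using PySem.List.pyGetD_natCast [a, b] 0 0
  have h1 : PySem.List.pyGetD [a, b] 1 0 = b := by
    have := PySem.List.pyGetD_natCast [a, b] 1 0
    simpa using this
  simp [pvNbrs, h0, h1]

theorem pvGood_of_pre {robots : List (List (List Int))} {g : Int}
    (hpre : Pre_find_group robots g) :
    pvGood (PySem.Set.ofList (robots.map (fun r => PySem.List.pyGetD r 0 []))) := by
  have hmem : ∀ x ∈ PySem.Set.ofList (robots.map (fun r => PySem.List.pyGetD r 0 [])),
      ∃ r ∈ robots, x = PySem.List.pyGetD r 0 [] := by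
    intro x hx
    have := (PySem.Set.mem_ofList _ _).mp hx
    rcases List.mem_map.mp this with ⟨r, hr, he⟩
    exact ⟨r, hr, he.symm⟩
  rcases hpre.2 with h2 | h2
  · have hlen : ∀ x ∈ PySem.Set.ofList (robots.map (fun r => PySem.List.pyGetD r 0 [])),
        x.length = 2 := by
      intro x hx; rcases hmem x hx with ⟨r, hr, rfl⟩; exact h2 r hr
    constructor
    · rintro p q ⟨hp, hq, hnb⟩
      obtain ⟨a, b, rfl⟩ := List.length_eq_two.mp (hlen p hp)
      refine ⟨hq, hp, ?_⟩
      rw [pvNbrs_pair] at hnb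
      simp only [List.mem_cons, List.not_mem_nil, or_false] at hnb
      rcases hnb with rfl | rfl | rfl | rfl
      · rw [pvNbrs_pair]
        have e : a - 1 + 1 = a := by ring
        simp [e]
      · rw [pvNbrs_pair]
        have e : a + 1 - 1 = a := by ring
        simp [e]
      · rw [pvNbrs_pair]
        have e : b - 1 + 1 = b := by ring
        simp [e]
      · rw [pvNbrs_pair]
        have e : b + 1 - 1 = b := by ring
        simp [e]
    · rintro p ⟨hp, _, hnb⟩
      obtain ⟨a, b, rfl⟩ := List.length_eq_two.mp (hlen p hp)
      rw [pvNbrs_pair] at hnb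
      simp only [List.mem_cons, List.not_mem_nil, or_false, List.cons.injEq, and_true] at hnb
      omega
  · have hlen : ∀ x ∈ PySem.Set.ofList (robots.map (fun r => PySem.List.pyGetD r 0 [])),
        2 < x.length := by
      intro x hx; rcases hmem x hx with ⟨r, hr, rfl⟩; exact h2 r hr
    have hno : ∀ p q, ¬ pvAdj (PySem.Set.ofList (robots.map (fun r => PySem.List.pyGetD r 0 []))) p q := by
      rintro p q ⟨hp, hq, hnb⟩
      have hq2 : q.length = 2 := by
        unfold pvNbrs at hnb
        simp only [List.mem_cons, List.not_mem_nil, or_false] at hnb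
        rcases hnb with rfl | rfl | rfl | rfl <;> rfl
      have := hlen q hq
      omega
    exact ⟨fun p q h => absurd h (hno p q), fun p h => absurd h (hno p p)⟩

-- ===== VERDICT (by name: the statement is the Claim_ definition above) =====
theorem find_group_spec : Claim_equal_find_group := by
  intro robots group_size _ hpre
  unfold Spec_find_group
  have hgood := pvGood_of_pre hpre
  have hA := pvA_char (g := group_size) hgood
  have hB := pvB_char (g := group_size) hgood
  have hiff : (find_group robots group_size = true) ↔ (find_group_alt robots group_size = true) :=
    hA.trans hB.symm
  cases hA' : find_group robots group_size <;> cases hB' : find_group_alt robots group_size <;>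
    simp_all
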